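-- pv_equiv track=rewrite | github.com/lucianoaf8/gmail_assistant | src/tools/markdown_post_fixer.py | collapse_rules
-- ===== SOURCE A (Python) =====
-- from typing import Iterable, List
--
-- def collapse_rules(lines: Iterable[str]) -> List[str]:
--     collapsed: List[str] = []
--     previous_non_blank = ""
--     for line in lines:
--         if line == "" and collapsed and collapsed[-1] == "":
--             continue
--         if line == "---" and previous_non_blank == "---":
--             continue
--         collapsed.append(line)
--         if line.strip():
--             previous_non_blank = line.strip()
--     return collapsed
-- ===== SOURCE B (Python) =====
-- from typing import Iterable, List
--
-- def collapse_rules(lines: Iterable[str]) -> List[str]: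
--     # Pass 1: drop a '---' rule whenever the previous non-blank (stripped) line is '---'.
--     deduped: List[str] = []
--     prev_non_blank = ""
--     for line in lines:
--         if line == "---" and prev_non_blank == "---":
--             continue
--         deduped.append(line)
--         prev_non_blank = line.strip() or prev_non_blank
--     # Pass 2: collapse blank runs by comparing each line with its predecessor.
--     return deduped[:1] + [cur for prev, cur in zip(deduped, deduped[1:])
--                           if not (cur == "" and prev == "")]
-- ===== Notes on version B (the rewrite author's own statement) =====
-- stated objective: alternative
-- what changed: B splits A's single interleaved stateful pass into two passes: first a rule-dedup pass tracking the previous non-blank stripped line, then a blank-collapse expressed as a zip-with-predecessor comprehension instead of checking the output accumulator's last element.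
import Mathlib
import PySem

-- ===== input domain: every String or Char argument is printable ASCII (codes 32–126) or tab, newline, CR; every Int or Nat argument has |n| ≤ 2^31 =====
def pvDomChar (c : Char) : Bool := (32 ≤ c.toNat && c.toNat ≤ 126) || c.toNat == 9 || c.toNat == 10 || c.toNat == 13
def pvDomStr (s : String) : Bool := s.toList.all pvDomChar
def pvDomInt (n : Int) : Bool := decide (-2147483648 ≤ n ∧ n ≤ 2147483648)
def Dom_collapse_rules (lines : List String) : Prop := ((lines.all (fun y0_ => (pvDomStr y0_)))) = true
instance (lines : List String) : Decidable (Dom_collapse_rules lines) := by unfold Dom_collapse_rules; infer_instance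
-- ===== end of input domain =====

-- B replaces A's single stateful pass by two passes: rule-dedup first, then a
-- pairwise (zip-with-predecessor) blank collapse; same values, alternative decomposition.

-- ===== PORT A =====
-- one fold, state = (collapsed, previous_non_blank), mirroring A's loop body
def collapseAStep (acc : List String × String) (line : String) : List String × String :=
  if line = "" ∧ acc.1.getLast? = some "" then acc          -- line == "" and collapsed and collapsed[-1] == ""
  else if line = "---" ∧ acc.2 = "---" then acc             -- line == "---" and previous_non_blank == "---"
  else (acc.1 ++ [line],
        if PySem.Str.strip line = "" then acc.2 else PySem.Str.strip line)  -- if line.strip(): previous_non_blank = line.strip()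

def collapse_rules (lines : List String) : List String :=
  (lines.foldl collapseAStep ([], "")).1

-- ===== PORT B =====
-- pass 1: fold with state (deduped, prev_non_blank)
def dedupStep (acc : List String × String) (line : String) : List String × String :=
  if line = "---" ∧ acc.2 = "---" then acc
  else (acc.1 ++ [line],
        if PySem.Str.strip line = "" then acc.2 else PySem.Str.strip line)  -- line.strip() or prev_non_blank

-- not (cur == "" and prev == ""), for a pair (prev, cur)
def keepB (pc : String × String) : Bool := !(pc.2 == "" && pc.1 == "")

def collapse_rules_alt (lines : List String) : List String :=
  let deduped := (lines.foldl dedupStep ([], "")).1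
  -- deduped[:1] + [cur for prev, cur in zip(deduped, deduped[1:]) if not (cur == "" and prev == "")]
  deduped.take 1 ++ ((deduped.zip (deduped.drop 1)).filter keepB).map Prod.snd

-- ===== PRECONDITION & SPEC =====
def Spec_collapse_rules (lines : List String) (out : List String) : Prop := out = collapse_rules_alt lines
instance (lines : List String) (out : List String) : Decidable (Spec_collapse_rules lines out) := by unfold Spec_collapse_rules; infer_instance

-- ===== CLAIM (what is proved, stated in full; the proofs are below) =====
def Claim_equal_collapse_rules : Prop := ∀ (lines : List String), Dom_collapse_rules lines → Spec_collapse_rules lines (collapse_rules lines)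

-- ===== LEMMAS AND PROOFS =====

-- proof-side recursive form of B's pass 1
def dedupRec : List String → String → List String
  | [], _ => []
  | l :: rest, prev =>
    if l = "---" ∧ prev = "---" then dedupRec rest prev
    else l :: dedupRec rest (if PySem.Str.strip l = "" then prev else PySem.Str.strip l)

-- proof-side stateful blank collapse (what A's loop does after rule-dedup)
def blankStep (acc : List String) (line : String) : List String :=
  if line = "" ∧ acc.getLast? = some "" then acc else acc ++ [line]

-- proof-side blank collapse carrying the previous kept element
def blanksRec : Option String → List String → List String
  | _, [] => []
  | prev, l :: rest =>
    if l = "" ∧ prev = some "" then blanksRec prev rest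
    else l :: blanksRec (some l) rest

theorem dedup_fold_eq (lines : List String) : ∀ (acc : List String) (prev : String),
    (lines.foldl dedupStep (acc, prev)).1 = acc ++ dedupRec lines prev := by
  induction lines with
  | nil => intro acc prev; simp [dedupRec]
  | cons l rest ih =>
    intro acc prev
    simp only [List.foldl_cons, dedupStep, dedupRec]
    by_cases h : l = "---" ∧ prev = "---"
    · simp [h, ih]
    · by_cases hs : PySem.Str.strip l = "" <;> simp [h, hs, ih]

theorem fuse_eq (lines : List String) : ∀ (acc : List String) (prev : String),
    (lines.foldl collapseAStep (acc, prev)).1 = (dedupRec lines prev).foldl blankStep acc := by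
  induction lines with
  | nil => intro acc prev; simp [dedupRec]
  | cons l rest ih =>
    intro acc prev
    simp only [List.foldl_cons, collapseAStep]
    by_cases h1 : l = "" ∧ acc.getLast? = some ""
    · -- blank skipped by A; kept by pass 1 (strip "" = ""), skipped by blankStep
      have hl : l = "" := h1.1
      have hr : ¬ (l = "---" ∧ prev = "---") := by simp [hl]
      have hs : PySem.Str.strip l = "" := by subst hl; decide
      simp only [dedupRec, if_neg hr, hs, List.foldl_cons]
      rw [if_pos h1, blankStep, if_pos h1]
      exact ih acc prev
    · by_cases h2 : l = "---" ∧ prev = "---"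
      · simp only [if_neg h1, dedupRec, if_pos h2]
        exact ih acc prev
      · simp only [if_neg h1, dedupRec, if_neg h2, List.foldl_cons]
        rw [blankStep, if_neg h1]
        exact ih (acc ++ [l]) _

theorem blanks_fold_eq (d : List String) : ∀ (acc : List String),
    d.foldl blankStep acc = acc ++ blanksRec acc.getLast? d := by
  induction d with
  | nil => intro acc; simp [blanksRec]
  | cons l rest ih =>
    intro acc
    simp only [List.foldl_cons, blankStep, blanksRec]
    by_cases h : l = "" ∧ acc.getLast? = some ""
    · rw [if_pos h, if_pos h]
      exact ih acc
    · rw [if_neg h, if_neg h, ih (acc ++ [l])]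
      simp

theorem zip_filter_eq (rest : List String) : ∀ (p : String),
    (((p :: rest).zip rest).filter keepB).map Prod.snd = blanksRec (some p) rest := by
  induction rest with
  | nil => intro p; simp [blanksRec]
  | cons b rest' ih =>
    intro p
    simp only [List.zip_cons_cons, List.filter_cons]
    by_cases h : b = "" ∧ p = ""
    · obtain ⟨hb, hp⟩ := h; subst hb; subst hp
      have hk : keepB ("", "") = false := by decide
      rw [hk]
      simp only [Bool.false_eq_true, if_false, blanksRec]
      rw [if_pos (⟨trivial, trivial⟩ : True ∧ True)]
      exact ih ""
    · have hk : keepB (p, b) = true := by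
        simp only [keepB, Bool.not_eq_true', Bool.and_eq_false_iff, beq_eq_false_iff_ne, ne_eq]
        by_cases hb : b = ""
        · exact Or.inr (fun hp => h ⟨hb, hp⟩)
        · exact Or.inl hb
      rw [hk, if_pos rfl]
      simp only [List.map_cons, blanksRec]
      rw [if_neg (by intro hc; exact h ⟨hc.1, by simpa using hc.2⟩)]
      rw [ih b]

theorem blanks_top (d : List String) :
    d.take 1 ++ ((d.zip (d.drop 1)).filter keepB).map Prod.snd = blanksRec none d := by
  cases d with
  | nil => simp [blanksRec]
  | cons l rest =>
    simp only [List.take_succ_cons, List.take_zero, List.drop_succ_cons, List.drop_zero,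
      blanksRec]
    rw [if_neg (by simp)]
    simp only [List.singleton_append, List.cons.injEq, true_and]
    exact zip_filter_eq rest l

-- ===== VERDICT (by name: the statement is the Claim_ definition above) =====
theorem collapse_rules_spec : Claim_equal_collapse_rules := by
  intro lines _
  unfold Spec_collapse_rules collapse_rules collapse_rules_alt
  rw [fuse_eq, dedup_fold_eq, blanks_top]
  rw [blanks_fold_eq]
  simp
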